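-- pv_equiv track=rewrite | github.com/3LENDERMAN/Python_projects | primes.py | nth_smallest_prime_divisor
-- ===== SOURCE A (Python) =====
-- def nth_smallest_prime_divisor(num, index):
--     divisor = 2
--     while index > 0:
--         if num % divisor == 0:
--             num //= divisor
--             index -= 1
--         else:
--             divisor = next_prime(divisor)
--         if num == 1 and index > 0:
--             return None
--     return divisor
--
-- def next_prime(number):
--     while True:
--         number += 1
--         if is_prime(number):
--             return number
--
-- def is_prime(num):
--     if num < 2: return False
--     for i in range(2, num // 2 + 1):
--         if num % i == 0: return False
--     return True
-- ===== SOURCE B (Python) =====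
-- def nth_smallest_prime_divisor(num, index):
--     divisor = 2
--     while index > 0:
--         if num == 1:
--             return None
--         while num % divisor != 0:
--             divisor += 1
--         num //= divisor
--         index -= 1
--     return divisor
-- ===== Notes on version B (the rewrite author's own statement) =====
-- stated objective: faster
-- what changed: B trial-divides by every incrementing candidate divisor (any candidate that divides must be prime because smaller factors were already removed), eliminating A's next_prime/is_prime primality-testing machinery entirely.
-- outside the precondition, e.g. on nth_smallest_prime_divisor(-4, 1): A returns 2, B returns 2
import Mathlib
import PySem

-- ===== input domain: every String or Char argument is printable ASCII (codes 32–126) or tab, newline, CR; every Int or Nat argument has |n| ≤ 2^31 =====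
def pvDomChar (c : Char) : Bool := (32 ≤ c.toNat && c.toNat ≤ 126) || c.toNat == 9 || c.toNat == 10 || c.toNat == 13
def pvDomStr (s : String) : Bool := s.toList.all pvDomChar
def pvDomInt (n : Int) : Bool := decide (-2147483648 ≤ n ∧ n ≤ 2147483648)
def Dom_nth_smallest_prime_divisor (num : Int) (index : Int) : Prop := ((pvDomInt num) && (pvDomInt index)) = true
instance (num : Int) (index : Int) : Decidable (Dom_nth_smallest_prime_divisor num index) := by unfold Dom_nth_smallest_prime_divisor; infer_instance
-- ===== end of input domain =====

-- B replaces A's next_prime/is_prime machinery by bare trial division with an incrementing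
-- divisor (any candidate that divides is automatically prime, smaller factors being gone).

-- ===== PORT A =====
-- is_prime(num): scan i in range(2, num//2+1)
def isPrimeA (num : Int) : Bool :=
  if num < 2 then false
  else (PySem.List.pyRange 2 (PySem.Int.floordiv num 2 + 1) 1).all
        (fun i => !(PySem.Int.mod num i == 0))

-- next_prime(number): unbounded while-loop; fuel makes it total (chosen large enough at the call site)
def nextPrimeA : Nat → Int → Int
  | 0, number => number + 1
  | fuel+1, number =>
    if isPrimeA (number + 1) then number + 1
    else nextPrimeA fuel (number + 1)

-- A's while-loop; fuel only makes the recursion total.  Python's trailing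
-- 'if num == 1 and index > 0: return None' is inlined into both branches.
def loopA : Nat → Int → Int → Int → Option Int
  | 0, _, _, _ => none
  | fuel+1, num, divisor, index =>
    if index > 0 then
      if PySem.Int.mod num divisor = 0 then
        let num' := PySem.Int.floordiv num divisor
        let index' := index - 1
        if num' = 1 ∧ index' > 0 then none else loopA fuel num' divisor index'
      else
        let divisor' := nextPrimeA (num.toNat + divisor.toNat + 2) divisor
        if num = 1 ∧ index > 0 then none else loopA fuel num divisor' index
    else some divisor

def nth_smallest_prime_divisor (num : Int) (index : Int) : Option Int :=
  loopA (num.toNat + index.toNat + 2) num 2 index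

-- ===== PORT B =====
-- inner 'while num % divisor != 0: divisor += 1'; fuel makes it total
def findDivB : Nat → Int → Int → Int
  | 0, _, divisor => divisor
  | fuel+1, num, divisor =>
    if PySem.Int.mod num divisor ≠ 0 then findDivB fuel num (divisor + 1)
    else divisor

-- B's while-loop: each iteration performs exactly one division, so index counts iterations
def loopB : Nat → Int → Int → Int → Option Int
  | 0, _, _, _ => none
  | fuel+1, num, divisor, index =>
    if index > 0 then
      if num = 1 then none
      else
        let d := findDivB (num.toNat + 2) num divisor
        loopB fuel (PySem.Int.floordiv num d) d (index - 1)
    else some divisor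

def nth_smallest_prime_divisor_alt (num : Int) (index : Int) : Option Int :=
  loopB (index.toNat + 1) num 2 index

-- ===== PRECONDITION & SPEC =====
-- Pre_ excludes negative num with positive index: there A's loop diverges once num has been
-- reduced to -1 (e.g. num = -1, index = 1 never terminates); on a few such inputs with a small
-- index A happens to return before reaching -1 (e.g. (-4, 1) returns 2, as does B).
def Pre_nth_smallest_prime_divisor (num : Int) (index : Int) : Prop := 0 ≤ num ∨ index ≤ 0
instance (num : Int) (index : Int) : Decidable (Pre_nth_smallest_prime_divisor num index) := by
  unfold Pre_nth_smallest_prime_divisor; infer_instance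
def pvWitness_nth_smallest_prime_divisor : Int × Int := (12, 2)

def Spec_nth_smallest_prime_divisor (num : Int) (index : Int) (out : Option Int) : Prop := out = nth_smallest_prime_divisor_alt num index
instance (num : Int) (index : Int) (out : Option Int) : Decidable (Spec_nth_smallest_prime_divisor num index out) := by unfold Spec_nth_smallest_prime_divisor; infer_instance

-- ===== CLAIM (what is proved, stated in full; the proofs are below) =====
def Claim_equal_nth_smallest_prime_divisor : Prop := ∀ (num : Int) (index : Int), Dom_nth_smallest_prime_divisor num index → Pre_nth_smallest_prime_divisor num index → Spec_nth_smallest_prime_divisor num index (nth_smallest_prime_divisor num index)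

-- ===== LEMMAS AND PROOFS =====


lemma loopA_succ (f : Nat) (num divisor index : Int) :
    loopA (f+1) num divisor index =
      if index > 0 then
        if PySem.Int.mod num divisor = 0 then
          if PySem.Int.floordiv num divisor = 1 ∧ index - 1 > 0 then none
          else loopA f (PySem.Int.floordiv num divisor) divisor (index - 1)
        else
          if num = 1 ∧ index > 0 then none
          else loopA f num (nextPrimeA (num.toNat + divisor.toNat + 2) divisor) index
      else some divisor := rfl

lemma loopB_succ (f : Nat) (num divisor index : Int) :
    loopB (f+1) num divisor index =
      if index > 0 then
        if num = 1 then none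
        else loopB f (PySem.Int.floordiv num (findDivB (num.toNat + 2) num divisor))
               (findDivB (num.toNat + 2) num divisor) (index - 1)
      else some divisor := rfl

-- "n has no divisor in [2, n)" — for n ≥ 2 this is primality
def NoDiv (n : Int) : Prop := 2 ≤ n ∧ ∀ k : Int, 2 ≤ k → k < n → ¬ k ∣ n

lemma isPrimeA_eq (n : Int) (hn : 2 ≤ n) : isPrimeA n = true ↔ NoDiv n := by
  unfold isPrimeA NoDiv
  rw [if_neg (by omega), List.all_eq_true]
  constructor
  · intro h
    refine ⟨hn, ?_⟩
    intro k hk2 hkn hdvd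
    obtain ⟨m, hm⟩ := hdvd
    have hm2 : 2 ≤ m := by
      rcases (by omega : m < 2 ∨ 2 ≤ m) with hm' | hm'
      · rcases (by omega : m < 1 ∨ 1 ≤ m) with hm'' | hm''
        · have hle : k * m ≤ k * 0 := mul_le_mul_of_nonneg_left (by omega) (by omega)
          rw [mul_zero] at hle; linarith
        · have : m = 1 := by omega
          rw [this, mul_one] at hm; omega
      · exact hm'
    have h2k : 2 * k ≤ n := by nlinarith
    have hk_le : k ≤ PySem.Int.floordiv n 2 := by
      rw [PySem.Int.floordiv_eq_ediv_of_pos (by norm_num)]; omega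
    have hmem := h k (by rw [PySem.List.mem_pyRange_one]; omega)
    rw [Bool.not_eq_true', beq_eq_false_iff_ne] at hmem
    exact hmem ((PySem.Int.mod_eq_zero_iff_dvd n k).2 ⟨m, hm⟩)
  · rintro ⟨-, h⟩ i hi
    rw [PySem.List.mem_pyRange_one] at hi
    have hin : i < n := by
      have h2 : i ≤ n / 2 := by
        have := hi.2
        rw [PySem.Int.floordiv_eq_ediv_of_pos (by norm_num)] at this; omega
      omega
    rw [Bool.not_eq_true', beq_eq_false_iff_ne]
    intro h0
    exact h i hi.1 hin ((PySem.Int.mod_eq_zero_iff_dvd n i).1 h0)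

lemma nextPrimeA_eq (p : Int) (hp : NoDiv p) : ∀ fuel : Nat, ∀ d : Int, 2 ≤ d → d < p →
    (∀ q, d < q → q < p → ¬ NoDiv q) → (p - d).toNat ≤ fuel → nextPrimeA fuel d = p := by
  intro fuel
  induction fuel with
  | zero => intro d _ hdp _ hfuel; omega
  | succ f ih =>
    intro d hd hdp hleast hfuel
    by_cases hq : isPrimeA (d+1) = true
    · rcases eq_or_ne p (d+1) with h | h
      · simp only [nextPrimeA, if_pos hq]; omega
      · exact absurd ((isPrimeA_eq (d+1) (by omega)).1 hq) (hleast (d+1) (by omega) (by omega))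
    · have hne : p ≠ d + 1 := fun h => hq ((isPrimeA_eq (d+1) (by omega)).2 (by rw [h] at hp; exact hp))
      simp only [nextPrimeA, if_neg hq]
      exact ih (d+1) (by omega) (by omega) (fun q h1 h2 => hleast q (by omega) h2) (by omega)

lemma least_NoDiv_exists (gap : Nat) : ∀ d : Int, 2 ≤ d → ∀ e, NoDiv e → d < e →
    (e - d).toNat ≤ gap → ∃ p, NoDiv p ∧ d < p ∧ p ≤ e ∧ ∀ q, d < q → q < p → ¬ NoDiv q := by
  induction gap with
  | zero => intro d _ e _ hde hgap; omega
  | succ g ih =>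
    intro d hd e he hde hgap
    by_cases h1 : NoDiv (d+1)
    · exact ⟨d+1, h1, by omega, by omega, fun q hq1 hq2 => absurd hq2 (by omega)⟩
    · rcases eq_or_ne e (d+1) with rfl | hne
      · exact absurd he h1
      · obtain ⟨p, hp, h2, h3, h4⟩ := ih (d+1) (by omega) e he (by omega) (by omega)
        refine ⟨p, hp, by omega, h3, ?_⟩
        intro q hq1 hq2
        rcases eq_or_ne q (d+1) with rfl | hqne
        · exact h1
        · exact h4 q (by omega) hq2

lemma least_dvd_exists (gap : Nat) : ∀ d : Int, 2 ≤ d → ∀ num, 2 ≤ num → d ≤ num →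
    (num - d).toNat ≤ gap →
    ∃ e, d ≤ e ∧ e ≤ num ∧ e ∣ num ∧ ∀ k, d ≤ k → k < e → ¬ k ∣ num := by
  induction gap with
  | zero =>
    intro d hd num hnum hdnum hgap
    have hdn : d = num := by omega
    subst hdn
    exact ⟨d, le_rfl, le_rfl, dvd_rfl, fun k hk1 hk2 => absurd hk2 (by omega)⟩
  | succ g ih =>
    intro d hd num hnum hdnum hgap
    by_cases hdvd : d ∣ num
    · exact ⟨d, le_rfl, hdnum, hdvd, fun k hk1 hk2 => absurd hk2 (by omega)⟩
    · have hlt : d < num := by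
        rcases eq_or_ne d num with rfl | h
        · exact absurd dvd_rfl hdvd
        · omega
      obtain ⟨e, h1, h2, h3, h4⟩ := ih (d+1) (by omega) num hnum (by omega) (by omega)
      refine ⟨e, by omega, h2, h3, ?_⟩
      intro k hk1 hk2
      rcases eq_or_ne k d with rfl | hk
      · exact hdvd
      · exact h4 k (by omega) hk2

lemma findDivB_eq (fuel : Nat) : ∀ d num e : Int, 2 ≤ d → d ≤ e → e ∣ num →
    (∀ k, d ≤ k → k < e → ¬ k ∣ num) → (e - d).toNat < fuel → findDivB fuel num d = e := by
  induction fuel with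
  | zero => intro d num e _ _ _ _ hfuel; omega
  | succ f ih =>
    intro d num e hd hde hdvd hleast hfuel
    rcases eq_or_ne d e with rfl | hne
    · have hmod : PySem.Int.mod num d = 0 := (PySem.Int.mod_eq_zero_iff_dvd num d).2 hdvd
      simp only [findDivB]
      rw [if_neg (by simp [hmod])]
    · have hndvd : ¬ d ∣ num := hleast d le_rfl (by omega)
      have hmod : PySem.Int.mod num d ≠ 0 := fun h => hndvd ((PySem.Int.mod_eq_zero_iff_dvd num d).1 h)
      simp only [findDivB]
      rw [if_pos hmod]
      exact ih (d+1) num e (by omega) (by omega) hdvd (fun k h1 h2 => hleast k (by omega) h2) (by omega)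

lemma walkA (e num : Int) (hdvdE : e ∣ num) (hnum : 2 ≤ num)
    (hL : ∀ k, 2 ≤ k → k < e → ¬ k ∣ num) :
    ∀ gap : Nat, ∀ d : Int, ∀ fa : Nat, ∀ index : Int, 2 ≤ d → d ≤ e → 0 < index →
    (e - d).toNat ≤ gap → gap < fa →
    ∃ j ≤ gap, loopA fa num d index = loopA (fa - j) num e index := by
  intro gap
  induction gap with
  | zero =>
    intro d fa index hd hde hidx hgap hfa
    have hdn : d = e := by omega
    exact ⟨0, le_rfl, by rw [hdn, Nat.sub_zero]⟩
  | succ g ih =>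
    intro d fa index hd hde hidx hgap hfa
    rcases eq_or_ne d e with rfl | hne
    · exact ⟨0, Nat.zero_le _, by rw [Nat.sub_zero]⟩
    · have hdlt : d < e := by omega
      have he2 : 2 ≤ e := by omega
      have hNoDivE : NoDiv e := ⟨he2, fun k hk1 hk2 hkdvd => hL k hk1 hk2 (hkdvd.trans hdvdE)⟩
      obtain ⟨p, hpN, hdp, hpe, hpleast⟩ := least_NoDiv_exists (e - d).toNat d hd e hNoDivE hdlt le_rfl
      have hndvd : ¬ d ∣ num := hL d hd hdlt
      have hmod : PySem.Int.mod num d ≠ 0 := fun h => hndvd ((PySem.Int.mod_eq_zero_iff_dvd num d).1 h)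
      have he_le_num : e ≤ num := Int.le_of_dvd (by omega) hdvdE
      have hnp : nextPrimeA (num.toNat + d.toNat + 2) d = p :=
        nextPrimeA_eq p hpN _ d hd hdp hpleast (by omega)
      obtain ⟨fa', rfl⟩ : ∃ f, fa = f + 1 := ⟨fa - 1, by omega⟩
      have step : loopA (fa'+1) num d index = loopA fa' num p index := by
        rw [loopA_succ, if_pos hidx, if_neg hmod, hnp,
          if_neg (by omega : ¬ (num = 1 ∧ index > 0))]
      obtain ⟨j, hj, hrec⟩ := ih p fa' index hpN.1 hpe hidx (by omega) (by omega)
      refine ⟨j + 1, by omega, ?_⟩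
      rw [show fa' + 1 - (j + 1) = fa' - j from by omega, step, hrec]

lemma key_arith (num d e : Int) (hd : 2 ≤ d) (hde : d ≤ e) (he : e ∣ num)
    (hnum : 2 ≤ num) : num / e + (e - d) ≤ num := by
  have he0 : (0:Int) < e := by omega
  obtain ⟨m, hm⟩ := he
  have hdiv : num / e = m := by rw [hm]; exact Int.mul_ediv_cancel_left m (by omega)
  have hm1 : 1 ≤ m := by
    rcases (by omega : 1 ≤ m ∨ m ≤ 0) with h | h
    · exact h
    · have hle : e * m ≤ e * 0 := mul_le_mul_of_nonneg_left (by omega) (by omega)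
      rw [mul_zero] at hle
      linarith
  rw [hdiv]
  rcases eq_or_lt_of_le hm1 with h1 | h2
  · have hnum_e : num = e := by rw [hm, ← h1, mul_one]
    omega
  · have hx : e + m ≤ e * m + 1 := by nlinarith
    linarith [hm]

lemma mainAB : ∀ ixn : Nat, ∀ num d index : Int, ∀ fa : Nat, index.toNat = ixn → 0 ≤ num →
    2 ≤ d → (∀ k : Int, 2 ≤ k → k < d → ¬ k ∣ num) → num.toNat + ixn + 1 ≤ fa →
    loopA fa num d index = loopB (ixn + 1) num d index := by
  intro ixn
  induction ixn with
  | zero =>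
    intro num d index fa h0 hnn hd hinv hfa
    have hidx : ¬ (index > 0) := by omega
    obtain ⟨f, rfl⟩ : ∃ f, fa = f + 1 := ⟨fa - 1, by omega⟩
    rw [loopA_succ, loopB_succ, if_neg hidx, if_neg hidx]
  | succ ixn ih =>
    intro num d index fa h0 hnn hd hinv hfa
    have hidx : 0 < index := by omega
    obtain ⟨f, rfl⟩ : ∃ f, fa = f + 1 := ⟨fa - 1, by omega⟩
    rcases eq_or_ne num 0 with rfl | hne0
    · have hmod : PySem.Int.mod (0:Int) d = 0 := (PySem.Int.mod_eq_zero_iff_dvd 0 d).2 (dvd_zero d)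
      have hfd : PySem.Int.floordiv (0:Int) d = 0 := by
        rw [PySem.Int.floordiv_eq_ediv_of_pos (by omega)]
        simp
      have hfind : findDivB ((0:Int).toNat + 2) 0 d = d :=
        findDivB_eq _ d 0 d hd le_rfl (dvd_zero d) (fun k h1 h2 => absurd h2 (by omega)) (by omega)
      have hA : loopA (f+1) 0 d index = loopA f 0 d (index - 1) := by
        rw [loopA_succ, if_pos hidx, if_pos hmod, hfd,
          if_neg (by omega : ¬ ((0:Int) = 1 ∧ index - 1 > 0))]
      have hB : loopB (ixn+1+1) 0 d index = loopB (ixn+1) 0 d (index - 1) := by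
        rw [loopB_succ, if_pos hidx, if_neg (by omega : ¬ (0:Int) = 1), hfind, hfd]
      rw [hA, hB]
      exact ih 0 d (index - 1) f (by omega) le_rfl hd hinv (by omega)
    · rcases eq_or_ne num 1 with rfl | hne1
      · have hmod : PySem.Int.mod (1:Int) d ≠ 0 := by
          rw [PySem.Int.mod_eq_emod_of_pos (by omega), Int.emod_eq_of_lt (by norm_num) (by omega)]
          norm_num
        have hA : loopA (f+1) 1 d index = none := by
          rw [loopA_succ, if_pos hidx, if_neg hmod, if_pos ⟨rfl, hidx⟩]
        have hB : loopB (ixn+1+1) 1 d index = none := by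
          rw [loopB_succ, if_pos hidx, if_pos rfl]
        rw [hA, hB]
      · have hnum2 : 2 ≤ num := by omega
        have hd_le_num : d ≤ num := by
          rcases (by omega : d ≤ num ∨ num < d) with h | h
          · exact h
          · exact absurd dvd_rfl (hinv num hnum2 h)
        obtain ⟨e, hde, hen, hedvd, heleast⟩ :=
          least_dvd_exists (num - d).toNat d hd num hnum2 hd_le_num le_rfl
        have hL : ∀ k, 2 ≤ k → k < e → ¬ k ∣ num := by
          intro k h1 h2
          rcases (by omega : k < d ∨ d ≤ k) with h | h
          · exact hinv k h1 h
          · exact heleast k h h2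
        obtain ⟨j, hj, hstep⟩ :=
          walkA e num hedvd hnum2 hL (e - d).toNat d (f+1) index hd hde hidx le_rfl (by omega)
        rw [hstep]
        obtain ⟨f', hf'⟩ : ∃ f', f + 1 - j = f' + 1 := ⟨f - j, by omega⟩
        rw [hf']
        have he2 : 2 ≤ e := by omega
        have hmod : PySem.Int.mod num e = 0 := (PySem.Int.mod_eq_zero_iff_dvd num e).2 hedvd
        have hfde : PySem.Int.floordiv num e = num / e := PySem.Int.floordiv_eq_ediv_of_pos (by omega)
        have hfind : findDivB (num.toNat + 2) num d = e :=
          findDivB_eq _ d num e hd hde hedvd heleast (by omega)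
        have harith : num / e + (e - d) ≤ num := key_arith num d e hd hde hedvd hnum2
        have hq1 : (1:Int) ≤ num / e := by
          rw [Int.le_ediv_iff_mul_le (by omega)]
          omega
        have hqdvd : num / e ∣ num := ⟨e, (Int.ediv_mul_cancel hedvd).symm⟩
        have hAside : loopA (f'+1) num e index =
            (if num / e = 1 ∧ index - 1 > 0 then none else loopA f' (num / e) e (index - 1)) := by
          rw [loopA_succ, if_pos hidx, if_pos hmod, hfde]
        have hBside : loopB (ixn+1+1) num d index = loopB (ixn+1) (num / e) e (index - 1) := by
          rw [loopB_succ, if_pos hidx, if_neg hne1, hfind, hfde]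
        by_cases hguard : num / e = 1 ∧ index - 1 > 0
        · rw [hAside, if_pos hguard, hBside, hguard.1]
          rw [loopB_succ, if_pos hguard.2, if_pos rfl]
        · rw [hAside, if_neg hguard, hBside]
          obtain ⟨q, hq⟩ : ∃ q, num / e = q := ⟨_, rfl⟩
          rw [hq] at harith hq1 hqdvd ⊢
          exact ih q e (index - 1) f' (by omega) (by omega) he2
            (fun k h1 h2 hk => hL k h1 h2 (hk.trans hqdvd)) (by omega)

-- ===== VERDICT (by name: the statement is the Claim_ definition above) =====
theorem nth_smallest_prime_divisor_spec : Claim_equal_nth_smallest_prime_divisor := by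
  intro num index _ hpre
  unfold Spec_nth_smallest_prime_divisor nth_smallest_prime_divisor nth_smallest_prime_divisor_alt
  rcases (by omega : 0 ≤ num ∨ num < 0) with hnn | hneg
  · exact mainAB index.toNat num 2 index _ rfl hnn le_rfl
      (fun k h1 h2 => absurd h2 (by omega)) (by omega)
  · have hidx : index ≤ 0 := by
      rcases hpre with h | h
      · omega
      · exact h
    have h0 : index.toNat = 0 := by omega
    rw [h0]
    obtain ⟨f, hf⟩ : ∃ f, num.toNat + 0 + 2 = f + 1 := ⟨num.toNat + 1, by omega⟩
    rw [hf, loopA_succ, loopB_succ, if_neg (by omega : ¬ index > 0),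
      if_neg (by omega : ¬ index > 0)]
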